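-- pv_equiv track=rewrite | github.com/nonameuser2019/PythonLearnProject | codewars/cata_6/highest_rank_number.py | highest_rank
-- ===== SOURCE A (Python) =====
-- def highest_rank(arr: list):
--     result = 0
--     count = 0
--     arr.sort()
--     for i in arr:
--          if arr.count(i) >= count:
--             result = i
--             count = arr.count(i)
--     return result
-- ===== SOURCE B (Python) =====
-- def highest_rank(arr: list):
--     # one run-length pass over the sorted list (sorts arr in place, like the original)
--     arr.sort()
--     result = 0
--     best = 0
--     run = 0
--     prev = None
--     for x in arr:
--         if prev == x:
--             run += 1
--         else:
--             run = 1
--             prev = x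
--         if run >= best:
--             result = x
--             best = run
--     return result
-- ===== Notes on version B (the rewrite author's own statement) =====
-- stated objective: faster
-- what changed: Replaces the per-element arr.count rescan inside the loop with a single run-length pass over the sorted list, maintaining (run, best) counters so each element is visited once.
import Mathlib
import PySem

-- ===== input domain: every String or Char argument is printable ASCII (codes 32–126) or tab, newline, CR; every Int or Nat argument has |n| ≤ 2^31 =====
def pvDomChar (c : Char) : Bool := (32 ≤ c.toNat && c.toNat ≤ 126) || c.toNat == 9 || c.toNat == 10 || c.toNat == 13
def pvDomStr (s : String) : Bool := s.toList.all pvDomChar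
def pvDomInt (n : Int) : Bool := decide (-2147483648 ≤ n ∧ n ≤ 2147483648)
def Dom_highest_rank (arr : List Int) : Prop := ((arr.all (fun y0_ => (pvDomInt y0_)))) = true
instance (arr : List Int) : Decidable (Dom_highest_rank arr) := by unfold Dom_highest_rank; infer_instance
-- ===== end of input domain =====

-- B replaces A's quadratic per-element arr.count rescan by one run-length pass over the
-- sorted list (faster). Both A and B sort arr in place; the equivalence proved is about
-- the return value.

-- ===== PORT A =====
-- A's loop body: compare the element's full count in the sorted list with the running best.
def stepA (s : List Int) (st : Int × Int) (i : Int) : Int × Int :=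
  if ((PySem.List.count s i : Int)) ≥ st.2 then (i, (PySem.List.count s i : Int)) else st

def highest_rank (arr : List Int) : Int :=
  let s := PySem.List.sorted arr (fun x => x) false
  (s.foldl (stepA s) (0, 0)).1

-- ===== PORT B =====
-- B's loop body: state (result, best, run, prev); extend or reset the run, update on run ≥ best.
def stepB (st : Int × Int × Int × Option Int) (x : Int) : Int × Int × Int × Option Int :=
  let run : Int := if st.2.2.2 = some x then st.2.2.1 + 1 else 1
  if run ≥ st.2.1 then (x, run, run, some x) else (st.1, st.2.1, run, some x)

def highest_rank_alt (arr : List Int) : Int :=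
  let s := PySem.List.sorted arr (fun x => x) false
  (s.foldl stepB (0, 0, 0, none)).1

-- ===== PRECONDITION & SPEC =====
def Spec_highest_rank (arr : List Int) (out : Int) : Prop := out = highest_rank_alt arr
instance (arr : List Int) (out : Int) : Decidable (Spec_highest_rank arr out) := by unfold Spec_highest_rank; infer_instance

-- ===== CLAIM (what is proved, stated in full; the proofs are below) =====
def Claim_equal_highest_rank : Prop := ∀ (arr : List Int), Dom_highest_rank arr → Spec_highest_rank arr (highest_rank arr)

-- ===== LEMMAS AND PROOFS =====

-- stepA is a fixed point after one application (a second visit to the same value changes nothing)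
theorem stepA_fix (s : List Int) (st : Int × Int) (a : Int) :
    stepA s (stepA s st a) a = stepA s st a := by
  unfold stepA
  split
  · simp
  · simp_all

theorem foldl_replicate_fix {α β : Type} (f : α → β → α) (b : β) :
    ∀ (m : Nat) (st : α), f st b = st → (List.replicate m b).foldl f st = st := by
  intro m
  induction m with
  | zero => intro st _; rfl
  | succ m ih => intro st h; simp only [List.replicate_succ, List.foldl_cons, h]; exact ih st h

-- A's fold over a run of equal elements collapses to a single step
theorem foldA_run (s : List Int) (a : Int) :
    ∀ (m : Nat), 1 ≤ m → ∀ (st : Int × Int),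
      (List.replicate m a).foldl (stepA s) st = stepA s st a := by
  intro m hm st
  obtain ⟨m', rfl⟩ : ∃ m', m = m' + 1 := ⟨m - 1, by omega⟩
  simp only [List.replicate_succ, List.foldl_cons]
  exact foldl_replicate_fix _ _ m' _ (stepA_fix s st a)

-- B's fold over a run, continuing an existing run of a's (prev = some a, run = j so far)
theorem foldB_in_run (a : Int) :
    ∀ (k : Nat), 1 ≤ k → ∀ (r c j : Int),
      (List.replicate k a).foldl stepB (r, c, j, some a) =
        if j + (k : Int) ≥ c then (a, j + k, j + k, some a) else (r, c, j + k, some a) := by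
  intro k
  induction k with
  | zero => intro h; omega
  | succ k ih =>
    intro _ r c j
    by_cases hk : k = 0
    · subst hk
      simp only [List.replicate_succ, List.replicate_zero, List.foldl_cons, List.foldl_nil, stepB]
      norm_num
    · simp only [List.replicate_succ, List.foldl_cons, stepB, if_true]
      split
      · rename_i h1
        rw [ih (by omega) a (j + 1) (j + 1)]
        rw [if_pos (by omega), if_pos (by push_cast; omega)]
        simp
        omega
      · rename_i h1
        rw [ih (by omega) r c (j + 1)]
        by_cases h2 : j + ((k : Int) + 1) ≥ c
        · rw [if_pos (by omega), if_pos (by push_cast; omega)]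
          simp
          omega
        · rw [if_neg (by push_cast; omega), if_neg (by push_cast; omega)]
          simp
          omega

-- B's fold over a fresh run of a's (prev ≠ some a resets the run counter)
theorem foldB_run (a : Int) :
    ∀ (k : Nat), 1 ≤ k → ∀ (r c j : Int) (p : Option Int), p ≠ some a →
      (List.replicate k a).foldl stepB (r, c, j, p) =
        if (k : Int) ≥ c then (a, (k : Int), (k : Int), some a) else (r, c, (k : Int), some a) := by
  intro k hk r c j p hp
  obtain ⟨k', rfl⟩ : ∃ k', k = k' + 1 := ⟨k - 1, by omega⟩
  simp only [List.replicate_succ, List.foldl_cons, stepB]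
  rw [if_neg hp]
  by_cases hk0 : k' = 0
  · subst hk0
    simp only [List.replicate_zero, List.foldl_nil]
    by_cases h1 : (1 : Int) ≥ c
    · rw [if_pos h1, if_pos (by push_cast; omega)]; norm_num
    · rw [if_neg h1, if_neg (by push_cast; omega)]; norm_num
  · by_cases h1 : (1 : Int) ≥ c
    · rw [if_pos h1]
      rw [foldB_in_run a k' (by omega) a 1 1]
      rw [if_pos (by push_cast; omega), if_pos (by push_cast; omega)]
      simp
      omega
    · rw [if_neg h1]
      rw [foldB_in_run a k' (by omega) r c 1]
      by_cases h2 : ((k' : Int) + 1) ≥ c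
      · rw [if_pos (by omega), if_pos (by push_cast; omega)]
        simp
        omega
      · rw [if_neg (by omega), if_neg (by push_cast; omega)]
        simp
        omega

-- a sorted nonempty list splits into its first run and a strictly larger remainder
theorem sorted_head_split :
    ∀ (t : List Int) (a : Int), (a :: t).Pairwise (· ≤ ·) →
      ∃ (k : Nat) (t' : List Int),
        a :: t = List.replicate (k + 1) a ++ t' ∧ (∀ y ∈ t', a < y) ∧ t'.Pairwise (· ≤ ·) := by
  intro t
  induction t with
  | nil =>
    intro a _
    exact ⟨0, [], by simp, by simp, List.Pairwise.nil⟩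
  | cons b rest ih =>
    intro a h
    have htail : (b :: rest).Pairwise (· ≤ ·) := h.tail
    by_cases hab : a = b
    · subst hab
      obtain ⟨k, t', heq, hlt, hp⟩ := ih a htail
      refine ⟨k + 1, t', ?_, hlt, hp⟩
      rw [List.replicate_succ, List.cons_append, ← heq]
    · have hab' : a < b := lt_of_le_of_ne (List.rel_of_pairwise_cons h (by simp)) hab
      refine ⟨0, b :: rest, by simp, fun y hy => ?_, htail⟩
      rcases List.mem_cons.mp hy with rfl | hy
      · exact hab'
      · exact lt_of_lt_of_le hab' (List.rel_of_pairwise_cons htail hy)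

-- Main invariant: over a sorted suffix t whose elements count the same in s as in t,
-- with B's prev not occurring in t, the (result, best) components of both folds agree.
theorem main_inv :
    ∀ (n : Nat) (s t : List Int), t.length ≤ n → t.Pairwise (· ≤ ·) →
      (∀ y ∈ t, s.count y = t.count y) →
      ∀ (r c j : Int) (p : Option Int), (∀ y ∈ t, p ≠ some y) →
        (t.foldl stepB (r, c, j, p)).1 = (t.foldl (stepA s) (r, c)).1 ∧
        (t.foldl stepB (r, c, j, p)).2.1 = (t.foldl (stepA s) (r, c)).2 := by
  intro n
  induction n with
  | zero =>
    intro s t hlen _ _ r c j p _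
    have : t = [] := List.eq_nil_of_length_eq_zero (by omega)
    subst this; exact ⟨rfl, rfl⟩
  | succ n ih =>
    intro s t hlen hsort hcount r c j p hp
    cases t with
    | nil => exact ⟨rfl, rfl⟩
    | cons a t0 =>
      obtain ⟨k, t', heq, hlt, hp'⟩ := sorted_head_split t0 a hsort
      have hanot : a ∉ t' := fun h => absurd (hlt a h) (lt_irrefl a)
      have hcnt_a : s.count a = k + 1 := by
        have ha_mem : a ∈ a :: t0 := by simp
        rw [hcount a ha_mem, heq, List.count_append, List.count_replicate_self,
            List.count_eq_zero_of_not_mem hanot]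
      have hlen' : t'.length ≤ n := by
        have h2 := congrArg List.length heq
        simp only [List.length_cons, List.length_append, List.length_replicate] at h2
        simp only [List.length_cons] at hlen
        omega
      have hcount' : ∀ y ∈ t', s.count y = t'.count y := by
        intro y hy
        have hymem : y ∈ a :: t0 := by rw [heq]; exact List.mem_append_right _ hy
        have hya : a ≠ y := ne_of_lt (hlt y hy)
        rw [hcount y hymem, heq, List.count_append, List.count_replicate,
            if_neg (by simp [hya]), Nat.zero_add]
      have hp'' : ∀ y ∈ t', (some a : Option Int) ≠ some y := by
        intro y hy h
        exact absurd (Option.some.inj h) (ne_of_lt (hlt y hy))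
      have hpa : p ≠ some a := hp a (by simp)
      rw [heq, List.foldl_append, List.foldl_append]
      rw [foldA_run s a (k + 1) (by omega) (r, c)]
      rw [foldB_run a (k + 1) (by omega) r c j p hpa]
      have hstepA : stepA s (r, c) a =
          if ((k : Int) + 1) ≥ c then (a, (k : Int) + 1) else (r, c) := by
        unfold stepA
        rw [PySem.List.count_eq, hcnt_a]
        push_cast
        rfl
      rw [hstepA]
      by_cases hcond : ((k : Int) + 1) ≥ c
      · rw [if_pos hcond, if_pos (by push_cast; omega)]
        have := ih s t' hlen' hp' hcount' a ((k : Int) + 1) ((k : Int) + 1) (some a) hp''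
        constructor
        · rw [← this.1]; norm_cast
        · rw [← this.2]; norm_cast
      · rw [if_neg hcond, if_neg (by push_cast; omega)]
        exact ih s t' hlen' hp' hcount' r c ((k : Int) + 1) (some a) hp''

-- ===== VERDICT (by name: the statement is the Claim_ definition above) =====
theorem highest_rank_spec : Claim_equal_highest_rank := by
  intro arr _
  unfold Spec_highest_rank highest_rank highest_rank_alt
  set s := PySem.List.sorted arr (fun x => x) false with hs
  have hsort : s.Pairwise (· ≤ ·) := PySem.List.sorted_pairwise arr (fun x => x)
  have h := main_inv s.length s s le_rfl hsort (fun _ _ => rfl) 0 0 0 none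
    (fun y _ => by simp)
  exact (h.1).symm
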